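-- pv_equiv track=rewrite | github.com/AlexanderNemirov/quiz_hack | scripts/abc_quiz.py | do_magic
-- ===== SOURCE A (Python) =====
-- def chars_to_dict(cs):
--     c_dict = {}
--     for c in cs:
--         if c not in c_dict:
--             c_dict[c] = 0
--         c_dict[c] += 1
--     return c_dict
--
-- def check_words(words_to_check, chars_dict):
--     letters_dict = {}
--     for word in words_to_check:
--         for char in word:
--             if char not in letters_dict:
--                letters_dict[char] = 0
--             letters_dict[char] += 1
--
--     return True if letters_dict == chars_dict else False
--
-- def do_magic(words, chars):
--     chars_dict = chars_to_dict(chars)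
--
--     solution = []
--     solved = False
--
--     for i0 in range(0, len(words)-4):
--         for i1 in range(i0+1, len(words)-3):
--             for i2 in range(i1+1, len(words)-2):
--                 for i3 in range(i2+1, len(words)-1):
--                     for i4 in range(i3+1, len(words)):
--                         words_to_check = [words[i0], words[i1], words[i2], words[i3], words[i4]]
--                         if check_words(words_to_check, chars_dict):
--                             solution.append(words_to_check)
--                             solved = True
--     return solution, solved
-- ===== SOURCE B (Python) =====
-- def do_magic(words, chars):
--     target = sorted(chars)
--
--     def combos(xs, k):
--         if k == 0:
--             return [[]]
--         if len(xs) < k: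
--             return []
--         rest = xs[1:]
--         return [[xs[0]] + c for c in combos(rest, k - 1)] + combos(rest, k)
--
--     solution = [c for c in combos(words, 5)
--                 if sorted(ch for w in c for ch in w) == target]
--     return solution, bool(solution)
-- ===== Notes on version B (the rewrite author's own statement) =====
-- stated objective: alternative
-- what changed: B replaces A's five hard-coded nested index loops and per-combo dict-building/dict-equality check by a recursive k-combination generator over the list structure and a sorted-character-list comparison against a precomputed sorted target.
import Mathlib
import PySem

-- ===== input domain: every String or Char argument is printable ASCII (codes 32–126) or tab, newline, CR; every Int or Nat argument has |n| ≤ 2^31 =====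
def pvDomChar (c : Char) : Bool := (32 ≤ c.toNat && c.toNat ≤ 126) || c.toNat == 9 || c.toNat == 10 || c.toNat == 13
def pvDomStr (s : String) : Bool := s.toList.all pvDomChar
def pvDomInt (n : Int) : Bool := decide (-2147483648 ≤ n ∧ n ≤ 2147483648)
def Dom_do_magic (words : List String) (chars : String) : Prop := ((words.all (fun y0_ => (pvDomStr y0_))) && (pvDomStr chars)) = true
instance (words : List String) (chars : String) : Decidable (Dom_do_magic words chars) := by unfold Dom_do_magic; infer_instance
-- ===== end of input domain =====

-- B replaces A's five nested index loops + dict-equality check by a recursive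
-- combination generator and a sorted-characters comparison (alternative decomposition,
-- same asymptotic cost; equal return value proved below).

-- ===== PORT A =====

-- the counting step 'if c not in d: d[c] = 0; d[c] += 1'
def countStep (d : PySem.Dict Char Int) (c : Char) : PySem.Dict Char Int :=
  let d1 := if d.contains c then d else d.insert c 0
  d1.insert c (d1.getD c 0 + 1)

def chars_to_dict (cs : String) : PySem.Dict Char Int :=
  cs.toList.foldl countStep PySem.Dict.empty

-- Python's dict '==' ignores insertion order: equal key sets and equal values
def pyDictEq (d d' : PySem.Dict Char Int) : Bool :=
  PySem.Set.equal d.keys d'.keys && d.keys.all (fun k => d.getD k 0 == d'.getD k 0)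

def check_words (words_to_check : List String) (chars_dict : PySem.Dict Char Int) : Bool :=
  let letters := words_to_check.foldl (fun d w => w.toList.foldl countStep d) PySem.Dict.empty
  if pyDictEq letters chars_dict then true else false

def do_magic (words : List String) (chars : String) : List (List String) × Bool :=
  let chars_dict := chars_to_dict chars
  let n : Int := (words.length : Int)
  (PySem.List.pyRange 0 (n - 4) 1).foldl (fun st0 i0 =>
    (PySem.List.pyRange (i0 + 1) (n - 3) 1).foldl (fun st1 i1 =>
      (PySem.List.pyRange (i1 + 1) (n - 2) 1).foldl (fun st2 i2 =>
        (PySem.List.pyRange (i2 + 1) (n - 1) 1).foldl (fun st3 i3 =>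
          (PySem.List.pyRange (i3 + 1) n 1).foldl (fun st4 i4 =>
            let wtc := [PySem.List.pyGetD words i0 "", PySem.List.pyGetD words i1 "",
                        PySem.List.pyGetD words i2 "", PySem.List.pyGetD words i3 "",
                        PySem.List.pyGetD words i4 ""]
            if check_words wtc chars_dict then (st4.1 ++ [wtc], true) else st4)
            st3) st2) st1) st0)
    (([], false) : List (List String) × Bool)

-- ===== PORT B =====

-- 'combos(xs, k)': all k-element combinations, in order
def combosB : List String → Nat → List (List String)
  | _, 0 => [[]]
  | [], _ + 1 => []   -- covered by the 'len(xs) < k' guard in Python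
  | x :: rest, k + 1 =>
      if rest.length + 1 < k + 1 then [] else
      (combosB rest k).map (fun c => x :: c) ++ combosB rest (k + 1)

def do_magic_alt (words : List String) (chars : String) : List (List String) × Bool :=
  let target := PySem.List.sorted chars.toList (fun x => x) false
  let solution := (combosB words 5).filter
    (fun c => PySem.List.sorted (c.flatMap (fun w => w.toList)) (fun x => x) false == target)
  (solution, !solution.isEmpty)

-- ===== PRECONDITION & SPEC =====
def Spec_do_magic (words : List String) (chars : String) (out : List (List String) × Bool) : Prop := out = do_magic_alt words chars
instance (words : List String) (chars : String) (out : List (List String) × Bool) : Decidable (Spec_do_magic words chars out) := by unfold Spec_do_magic; infer_instance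

-- ===== CLAIM (what is proved, stated in full; the proofs are below) =====
def Claim_equal_do_magic : Prop := ∀ (words : List String) (chars : String), Dom_do_magic words chars → Spec_do_magic words chars (do_magic words chars)

-- ===== LEMMAS AND PROOFS =====

-- countStep is the standard counter step
theorem countStep_eq (d : PySem.Dict Char Int) (c : Char) :
    countStep d c = d.insert c (d.getD c 0 + 1) := by
  unfold countStep
  by_cases h : d.contains c = true
  · simp [h]
  · simp only [Bool.not_eq_true] at h
    rw [PySem.Dict.getD_of_not_contains d 0 h]
    simp [h, PySem.Dict.getD_insert_self, PySem.Dict.insert_insert_self]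

theorem foldl_countStep (l : List Char) (d : PySem.Dict Char Int) :
    l.foldl countStep d = l.foldl (fun d x => d.insert x (d.getD x 0 + 1)) d := by
  have h : countStep = fun d x => d.insert x (d.getD x 0 + 1) :=
    funext fun d => funext fun x => countStep_eq d x
  rw [h]

theorem chars_to_dict_eq (cs : String) :
    chars_to_dict cs = PySem.Dict.counter cs.toList := by
  unfold chars_to_dict
  rw [foldl_countStep, PySem.Dict.foldl_insert_getD_add_one_eq_counter]

theorem letters_eq (ws : List String) (d : PySem.Dict Char Int) :
    ws.foldl (fun d w => w.toList.foldl countStep d) d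
      = (ws.flatMap (fun w => w.toList)).foldl countStep d := by
  induction ws generalizing d with
  | nil => rfl
  | cons w rest ih => simp [List.foldl_append, ih]

-- Python dict equality of two counters is multiset (permutation) equality
theorem pyDictEq_counter (s t : List Char) :
    pyDictEq (PySem.Dict.counter s) (PySem.Dict.counter t) = true ↔ s.Perm t := by
  unfold pyDictEq
  simp only [Bool.and_eq_true, List.all_eq_true, PySem.Dict.keys_counter,
             PySem.Set.equal_iff, PySem.Set.mem_ofList, PySem.Dict.getD_counter, beq_iff_eq]
  constructor
  · rintro ⟨hmem, hcnt⟩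
    rw [List.perm_iff_count]
    intro c
    by_cases hc : c ∈ s
    · exact_mod_cast hcnt c hc
    · have hct : c ∉ t := fun h => hc ((hmem c).2 h)
      rw [List.count_eq_zero.2 hc, List.count_eq_zero.2 hct]
  · intro hp
    refine ⟨fun c => hp.mem_iff, fun c _ => ?_⟩
    exact_mod_cast List.perm_iff_count.1 hp c

-- the 'True if b else False' idiom is the Bool itself
theorem bool_if (b : Bool) : (if b then true else false) = b := by cases b <;> simp

-- A's check and B's check are the same Bool
theorem check_eq (c : List String) (chars : String) :
    check_words c (chars_to_dict chars)
      = (PySem.List.sorted (c.flatMap (fun w => w.toList)) (fun x => x) false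
          == PySem.List.sorted chars.toList (fun x => x) false) := by
  unfold check_words
  rw [chars_to_dict_eq, letters_eq, foldl_countStep,
      PySem.Dict.foldl_insert_getD_add_one_eq_counter, bool_if,
      Bool.eq_iff_iff, beq_iff_eq, pyDictEq_counter,
      ← PySem.List.sorted_id_eq_sorted_id_iff_perm]

-- proof-side recursive presentation of A's five nested loops
def loopA (words : List String) (cd : PySem.Dict Char Int) :
    Nat → Int → List String → (List (List String) × Bool) → (List (List String) × Bool)
  | 0, _, pre, st => if check_words pre cd then (st.1 ++ [pre], true) else st
  | k + 1, a, pre, st =>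
      (PySem.List.pyRange a ((words.length : Int) - k) 1).foldl
        (fun st i => loopA words cd k (i + 1) (pre ++ [PySem.List.pyGetD words i ""]) st) st

-- proof-side: the list of index combinations A enumerates, as suffix combinations
def nestAbs (words : List String) : Nat → Int → List (List String)
  | 0, _ => [[]]
  | k + 1, a =>
      (PySem.List.pyRange a ((words.length : Int) - k) 1).flatMap
        (fun i => (nestAbs words k (i + 1)).map (fun c => PySem.List.pyGetD words i "" :: c))

theorem do_magic_eq_loopA (words : List String) (chars : String) :
    do_magic words chars = loopA words (chars_to_dict chars) 5 0 [] ([], false) := by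
  rfl

theorem foldl_shape {α : Type} (l : List Int) (H : Int → List α) (s : List α) (b : Bool) :
    l.foldl (fun (st : List α × Bool) i => (st.1 ++ H i, st.2 || !(H i).isEmpty)) (s, b)
      = (s ++ l.flatMap H, b || !(l.flatMap H).isEmpty) := by
  induction l generalizing s b with
  | nil => simp
  | cons x xs ih =>
      simp only [List.foldl_cons, ih, List.flatMap_cons, List.append_assoc, Bool.or_assoc]
      cases H x <;> simp

theorem loopA_eq (words : List String) (cd : PySem.Dict Char Int) :
    ∀ (k : Nat) (a : Int) (pre : List String) (s : List (List String)) (b : Bool),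
      loopA words cd k a pre (s, b)
        = (s ++ ((nestAbs words k a).map (fun c => pre ++ c)).filter (fun c => check_words c cd),
           b || !(((nestAbs words k a).map (fun c => pre ++ c)).filter (fun c => check_words c cd)).isEmpty) := by
  intro k
  induction k with
  | zero =>
      intro a pre s b
      simp only [loopA, nestAbs, List.map_cons, List.map_nil, List.filter]
      by_cases h : check_words pre cd = true
      · simp [h]
      · simp only [Bool.not_eq_true] at h
        simp [h]
  | succ k ih =>
      intro a pre s b
      have hbody :
          (fun (st : List (List String) × Bool) i =>
              loopA words cd k (i + 1) (pre ++ [PySem.List.pyGetD words i ""]) st)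
            = (fun (st : List (List String) × Bool) i =>
                (st.1 ++ ((nestAbs words k (i + 1)).map
                    (fun c => (pre ++ [PySem.List.pyGetD words i ""]) ++ c)).filter
                    (fun c => check_words c cd),
                 st.2 || !(((nestAbs words k (i + 1)).map
                    (fun c => (pre ++ [PySem.List.pyGetD words i ""]) ++ c)).filter
                    (fun c => check_words c cd)).isEmpty)) := by
        funext st i
        cases st with
        | mk s' b' => exact ih (i + 1) (pre ++ [PySem.List.pyGetD words i ""]) s' b'
      have hM : ((nestAbs words (k + 1) a).map (fun c => pre ++ c)).filter
            (fun c => check_words c cd)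
          = (PySem.List.pyRange a ((words.length : Int) - k) 1).flatMap
              (fun i => ((nestAbs words k (i + 1)).map
                  (fun c => (pre ++ [PySem.List.pyGetD words i ""]) ++ c)).filter
                  (fun c => check_words c cd)) := by
        simp only [nestAbs, List.map_flatMap, List.filter_flatMap, List.map_map]
        refine List.flatMap_congr (fun i _ => ?_)
        congr 1
        refine List.map_congr_left (fun c _ => ?_)
        simp only [Function.comp_apply]
        rw [List.append_cons]
      show (PySem.List.pyRange a ((words.length : Int) - k) 1).foldl
              (fun st i => loopA words cd k (i + 1) (pre ++ [PySem.List.pyGetD words i ""]) st)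
              (s, b) = _
      rw [hbody, foldl_shape, hM]

theorem combosB_nil_of_short (xs : List String) (k : Nat) (h : xs.length < k) :
    combosB xs k = [] := by
  cases xs with
  | nil => cases k with
    | zero => omega
    | succ k => rfl
  | cons x rest => cases k with
    | zero => omega
    | succ k =>
        simp only [List.length_cons] at h
        simp [combosB, h]

theorem nestAbs_eq_combosB (words : List String) :
    ∀ (k : Nat) (a : Int), 0 ≤ a → nestAbs words k a = combosB (words.drop a.toNat) k := by
  intro k
  induction k with
  | zero => intro a _; cases List.drop a.toNat words <;> simp [nestAbs, combosB]
  | succ k ih =>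
      -- inner induction on the remaining length
      suffices h : ∀ (d : Nat) (a : Int), 0 ≤ a → words.length ≤ a.toNat + d →
          nestAbs words (k + 1) a = combosB (words.drop a.toNat) (k + 1) by
        intro a ha; exact h words.length a ha (by omega)
      intro d
      induction d with
      | zero =>
          intro a ha hlen
          have hdrop : words.drop a.toNat = [] := List.drop_eq_nil_of_le (by omega)
          have hrange : PySem.List.pyRange a ((words.length : Int) - k) 1 = [] :=
            PySem.List.pyRange_one_eq_nil (by omega)
          simp [nestAbs, hrange, hdrop, combosB]
      | succ d ihd =>
          intro a ha hlen
          by_cases hcase : (words.length : Int) - k ≤ a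
          · -- empty range, short suffix
            have hrange : PySem.List.pyRange a ((words.length : Int) - k) 1 = [] :=
              PySem.List.pyRange_one_eq_nil hcase
            have hshort : (words.drop a.toNat).length < k + 1 := by
              simp only [List.length_drop]; omega
            simp [nestAbs, hrange, combosB_nil_of_short _ _ hshort]
          · rw [not_le] at hcase
            have halt : a < (words.length : Int) := by omega
            have hanat : a.toNat < words.length := by omega
            have hcons : PySem.List.pyRange a ((words.length : Int) - k) 1
                = a :: PySem.List.pyRange (a + 1) ((words.length : Int) - k) 1 :=
              PySem.List.pyRange_one_cons hcase
            have hdrop : words.drop a.toNat = words[a.toNat] :: words.drop (a.toNat + 1) :=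
              List.drop_eq_getElem_cons hanat
            have hget : PySem.List.pyGetD words a "" = words[a.toNat] :=
              PySem.List.pyGetD_eq_getElem words "" ha (by simpa using halt)
            have htoNat : (a + 1).toNat = a.toNat + 1 := by omega
            have htail : nestAbs words (k + 1) (a + 1) = combosB (words.drop (a.toNat + 1)) (k + 1) := by
              have h := ihd (a + 1) (by omega) (by omega)
              rwa [htoNat] at h
            have hfirst : nestAbs words k (a + 1) = combosB (words.drop (a.toNat + 1)) k := by
              have h := ih (a + 1) (by omega)
              rwa [htoNat] at h
            have hguard : ¬ ((words.drop (a.toNat + 1)).length + 1 < k + 1) := by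
              simp only [List.length_drop]; omega
            calc nestAbs words (k + 1) a
                = (nestAbs words k (a + 1)).map (fun c => PySem.List.pyGetD words a "" :: c)
                    ++ nestAbs words (k + 1) (a + 1) := by
                  simp only [nestAbs, hcons, List.flatMap_cons]
              _ = combosB (words.drop a.toNat) (k + 1) := by
                  rw [hdrop, hget, hfirst, htail]
                  simp only [combosB, if_neg hguard]
  -- end

theorem do_magic_alt_eq (words : List String) (chars : String) :
    do_magic words chars = do_magic_alt words chars := by
  rw [do_magic_eq_loopA]
  have h5 := loopA_eq words (chars_to_dict chars) 5 0 [] [] false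
  rw [h5]
  have hnest : nestAbs words 5 0 = combosB words 5 := by
    simpa using nestAbs_eq_combosB words 5 0 le_rfl
  have hmap : (nestAbs words 5 0).map (fun c => ([] : List String) ++ c) = combosB words 5 := by
    simp [hnest]
  rw [hmap]
  unfold do_magic_alt
  have hfilter : (combosB words 5).filter (fun c => check_words c (chars_to_dict chars))
      = (combosB words 5).filter
          (fun c => PySem.List.sorted (c.flatMap (fun w => w.toList)) (fun x => x) false
            == PySem.List.sorted chars.toList (fun x => x) false) := by
    apply List.filter_congr
    intro c _
    exact check_eq c chars
  rw [hfilter]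
  simp

-- ===== VERDICT (by name: the statement is the Claim_ definition above) =====
theorem do_magic_spec : Claim_equal_do_magic := by
  intro words chars _
  unfold Spec_do_magic
  exact do_magic_alt_eq words chars
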